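-- pv_equiv track=rewrite | github.com/zihangg/kuberan | apps/bot/handlers/transaction_flow.py | _order_categories_hierarchically
-- ===== SOURCE A (Python) =====
-- def _order_categories_hierarchically(categories: list) -> list:
--     """Order categories so children appear directly after their parent."""
--     parents = [c for c in categories if not c.get('parent_id')]
--     children_map = {}
--     for c in categories:
--         pid = c.get('parent_id')
--         if pid:
--             children_map.setdefault(pid, []).append(c)
--
--     ordered = []
--     for p in parents:
--         ordered.append(p)
--         for child in children_map.get(p['id'], []):
--             ordered.append(child)
--
--     # Append any orphans whose parent isn't in the list
--     seen_ids = {c['id'] for c in ordered}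
--     for c in categories:
--         if c['id'] not in seen_ids:
--             ordered.append(c)
--
--     return ordered
-- ===== SOURCE B (Python) =====
-- def _order_categories_hierarchically(categories: list) -> list:
--     """Order categories so children appear directly after their parent.
--
--     Stable sort by a rank key instead of explicit bucketing: each top-level
--     parent gets its rank; a child sorts right after its parent; anything whose
--     parent is not a top-level parent sorts to the end, in original order.
--     """
--     parents = [c for c in categories if not c.get('parent_id')]
--     parent_rank = {p['id']: i for i, p in enumerate(parents)}
--     n = len(parents)
--
--     def sort_key(c):
--         pid = c.get('parent_id')
--         if not pid:
--             return (parent_rank[c['id']], 0)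
--         if pid in parent_rank:
--             return (parent_rank[pid], 1)
--         return (n, 2)
--
--     return sorted(categories, key=sort_key)
-- ===== Notes on version B (the rewrite author's own statement) =====
-- stated objective: alternative
-- what changed: Replaces A's explicit bucketing (a children_map dict, an interleaving append loop, and a seen-id set pass for orphans) by a single stable sort of the whole list under a (parent-rank, parent/child/orphan-tag) key.
import Mathlib
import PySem

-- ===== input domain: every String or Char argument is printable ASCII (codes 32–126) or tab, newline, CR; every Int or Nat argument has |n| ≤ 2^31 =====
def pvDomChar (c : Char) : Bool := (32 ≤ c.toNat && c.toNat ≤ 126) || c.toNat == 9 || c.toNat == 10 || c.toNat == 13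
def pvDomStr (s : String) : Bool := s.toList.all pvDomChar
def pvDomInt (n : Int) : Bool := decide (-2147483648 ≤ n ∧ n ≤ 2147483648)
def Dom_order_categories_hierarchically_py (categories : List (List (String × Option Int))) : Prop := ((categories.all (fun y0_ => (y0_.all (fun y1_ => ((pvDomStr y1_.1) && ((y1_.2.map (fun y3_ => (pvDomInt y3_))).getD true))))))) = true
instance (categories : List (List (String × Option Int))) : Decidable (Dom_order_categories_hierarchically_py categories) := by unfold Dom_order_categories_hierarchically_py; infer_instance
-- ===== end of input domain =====

-- B replaces A's dict/set bucketing passes by one stable sort under a (parent-rank, tag) key: a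
-- genuinely different decomposition of the same ordering task (not faster; O(n log n) vs O(n)).

-- ===== PORT A =====

-- `c.get(k)` (missing key collapses to None, as Python's dict.get does)
def pvGet (c : List (String × Option Int)) (k : String) : Option Int :=
  (PySem.Dict.get? (PySem.Dict.mk c) k).getD none

-- Python truthiness of an Optional[int]: None and 0 are falsy
def pvTruthy (o : Option Int) : Bool := match o with | some v => v != 0 | none => false

def pvId (c : List (String × Option Int)) : Option Int := pvGet c "id"
def pvPid (c : List (String × Option Int)) : Option Int := pvGet c "parent_id"

-- c['id'] is ported as pvId; where the key is absent Python raises KeyError — those inputs are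
-- excluded by Pre_ below, so the port is exact on the admitted domain.
def order_categories_hierarchically_py (categories : List (List (String × Option Int))) : List (List (String × Option Int)) :=
  let parents := categories.filter (fun c => !pvTruthy (pvPid c))
  let childrenMap : PySem.Dict (Option Int) (List (List (String × Option Int))) :=
    categories.foldl (fun m c =>
      let pid := pvPid c
      if pvTruthy pid then PySem.Dict.modify m pid [] (fun l => l ++ [c]) else m)
      (PySem.Dict.mk [])
  let ordered := parents.foldl (fun acc p =>
      let acc2 := acc ++ [p]
      (PySem.Dict.getD childrenMap (pvId p) []).foldl (fun a child => a ++ [child]) acc2) []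
  let seenIds : PySem.Set (Option Int) := PySem.Set.ofList (ordered.map pvId)
  categories.foldl (fun acc c => if PySem.Set.contains seenIds (pvId c) then acc else acc ++ [c]) ordered

-- ===== PORT B =====

-- {p['id']: i for i, p in enumerate(parents)}
def pvRankDict (parents : List (List (String × Option Int))) : PySem.Dict (Option Int) Int :=
  (PySem.List.enumerate parents).foldl (fun d ip => PySem.Dict.insert d (pvId ip.2) ip.1) (PySem.Dict.mk [])

-- sorted(categories, key=sort_key); the tuple key is ported with PySem.List.sorted2.
-- parent_rank[c['id']] / parent_rank[pid] are ported with getD 0: for the elements that reach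
-- those branches the key is always present, so the default is never used.
def order_categories_hierarchically_py_alt (categories : List (List (String × Option Int))) : List (List (String × Option Int)) :=
  let parents := categories.filter (fun c => !pvTruthy (pvPid c))
  let parentRank := pvRankDict parents
  let n : Int := parents.length
  PySem.List.sorted2 categories
    (fun c =>
      let pid := pvPid c
      if !pvTruthy pid then PySem.Dict.getD parentRank (pvId c) 0
      else if PySem.Dict.contains parentRank pid then PySem.Dict.getD parentRank pid 0
      else n)
    (fun c =>
      let pid := pvPid c
      if !pvTruthy pid then (0 : Int)
      else if PySem.Dict.contains parentRank pid then 1 else 2)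
    false

-- top-level parents, as A's first comprehension computes them (also used by Pre_ below)
def pvParents (categories : List (List (String × Option Int))) : List (List (String × Option Int)) :=
  categories.filter (fun c => !pvTruthy (pvPid c))

-- ===== PRECONDITION & SPEC =====

-- First conjunct: every category has an 'id' key — exactly the inputs on which A's c['id'] raises
-- KeyError.  The rest excludes the duplicate-id accidents of A's bookkeeping: duplicate ids among
-- top-level parents (A re-emits their children after every such parent) and an orphan whose id
-- collides with the id of an emitted parent/attached child (A silently drops that orphan).
def Pre_order_categories_hierarchically_py (categories : List (List (String × Option Int))) : Prop :=
  (∀ c ∈ categories, (PySem.Dict.get? (PySem.Dict.mk c) "id").isSome) ∧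
  ((pvParents categories).map pvId).Nodup ∧
  (∀ c ∈ categories, pvTruthy (pvPid c) = true → pvPid c ∉ (pvParents categories).map pvId →
    ∀ d ∈ categories, (pvTruthy (pvPid d) = false ∨ pvPid d ∈ (pvParents categories).map pvId) →
      pvId c ≠ pvId d)

instance (categories : List (List (String × Option Int))) : Decidable (Pre_order_categories_hierarchically_py categories) := by
  unfold Pre_order_categories_hierarchically_py; infer_instance

def pvWitness_order_categories_hierarchically_py : (List (List (String × Option Int))) :=
  [[("id", some 1)], [("id", some 2), ("parent_id", some 1)], [("id", some 3), ("parent_id", some 9)]]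

def Spec_order_categories_hierarchically_py (categories : List (List (String × Option Int))) (out : List (List (String × Option Int))) : Prop := out = order_categories_hierarchically_py_alt categories
instance (categories : List (List (String × Option Int))) (out : List (List (String × Option Int))) : Decidable (Spec_order_categories_hierarchically_py categories out) := by unfold Spec_order_categories_hierarchically_py; infer_instance

-- ===== CLAIM (what is proved, stated in full; the proofs are below) =====
def Claim_equal_order_categories_hierarchically_py : Prop := ∀ (categories : List (List (String × Option Int))), Dom_order_categories_hierarchically_py categories → Pre_order_categories_hierarchically_py categories → Spec_order_categories_hierarchically_py categories (order_categories_hierarchically_py categories)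

-- ===== LEMMAS AND PROOFS =====

-- proof-only helper definitions
def pvChl (categories : List (List (String × Option Int))) (k : Option Int) : List (List (String × Option Int)) :=
  categories.filter (fun c => pvTruthy (pvPid c) && (pvPid c == k))
def pvMain (categories : List (List (String × Option Int))) : List (List (String × Option Int)) :=
  (pvParents categories).flatMap (fun p => p :: pvChl categories (pvId p))
def pvK1 (categories : List (List (String × Option Int))) (c : List (String × Option Int)) : Int :=
  if !pvTruthy (pvPid c) then (pvRankDict (pvParents categories)).getD (pvId c) 0
  else if (pvRankDict (pvParents categories)).contains (pvPid c) then (pvRankDict (pvParents categories)).getD (pvPid c) 0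
  else ((pvParents categories).length : Int)
def pvK2 (categories : List (List (String × Option Int))) (c : List (String × Option Int)) : Int :=
  if !pvTruthy (pvPid c) then 0
  else if (pvRankDict (pvParents categories)).contains (pvPid c) then 1 else 2
def pvR (categories : List (List (String × Option Int))) (c : List (String × Option Int)) : Int :=
  3 * pvK1 categories c + pvK2 categories c
def pvKs (m : Nat) : List Int :=
  ((List.range m).flatMap (fun r : Nat => [3*(r:Int), 3*(r:Int)+1])) ++ [3*(m:Int)+2]



theorem pv_insertBy_cons {α : Type} (before : α → α → Bool) (x y : α) (ys : List α) :
    PySem.List.insertBy before x (y :: ys) =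
      if before x y then x :: y :: ys else y :: PySem.List.insertBy before x ys := by
  cases h : before x y <;> simp [PySem.List.insertBy, h]

theorem pv_insertBy_append {α : Type} (before : α → α → Bool) (x : α) :
    ∀ (l1 l2 : List α), (∀ y ∈ l1, before x y = false) →
      PySem.List.insertBy before x (l1 ++ l2) = l1 ++ PySem.List.insertBy before x l2 := by
  intro l1
  induction l1 with
  | nil => intro l2 _; rfl
  | cons y t ih =>
    intro l2 h
    have hy : before x y = false := h y (by simp)
    simp only [List.cons_append, pv_insertBy_cons, hy, Bool.false_eq_true, if_false]
    rw [ih l2 (fun z hz => h z (by simp [hz]))]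

theorem pv_insertBy_all {α : Type} (before : α → α → Bool) (x : α) (l : List α)
    (h : ∀ y ∈ l, before x y = true) : PySem.List.insertBy before x l = x :: l := by
  cases l with
  | nil => rfl
  | cons y t => rw [pv_insertBy_cons, if_pos (h y (by simp))]

theorem pv_flatMap_congr {α β : Type} (l : List α) (f g : α → List β)
    (h : ∀ a ∈ l, f a = g a) : l.flatMap f = l.flatMap g := by
  induction l with
  | nil => rfl
  | cons a t ih =>
    simp only [List.flatMap_cons, h a (by simp)]
    rw [ih (fun b hb => h b (by simp [hb]))]

theorem pv_flatMap_flatMap {α β γ : Type} (l : List α) (f : α → List β) (g : β → List γ) :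
    (l.flatMap f).flatMap g = l.flatMap (fun a => (f a).flatMap g) := by
  induction l with
  | nil => rfl
  | cons a t ih => simp [List.flatMap_cons, List.flatMap_append, ih]

theorem pv_insertBy_flat {α : Type} (key : α → Int) (x : α) :
    ∀ (ks : List Int) (F : Int → List α), ks.Pairwise (· < ·) → key x ∈ ks →
      (∀ k ∈ ks, ∀ y ∈ F k, key y = k) →
      PySem.List.insertBy (fun a b => decide (key a < key b)) x (ks.flatMap F) =
        ks.flatMap (fun k => F k ++ if key x = k then [x] else []) := by
  intro ks
  induction ks with
  | nil => intro F _ hx _; simp at hx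
  | cons k ks' ih =>
    intro F hp hx hF
    rw [List.pairwise_cons] at hp
    obtain ⟨hk, hp'⟩ := hp
    by_cases hxk : key x = k
    · have h1 : ∀ y ∈ F k, (fun a b => decide (key a < key b)) x y = false := by
        intro y hy
        have := hF k (by simp) y hy
        simp [this, hxk]
      have h2 : ∀ y ∈ ks'.flatMap F, (fun a b => decide (key a < key b)) x y = true := by
        intro y hy
        obtain ⟨k', hk', hy'⟩ := List.mem_flatMap.mp hy
        have := hF k' (by simp [hk']) y hy'
        simp only [this, hxk, decide_eq_true_eq]
        exact hk k' hk'
      rw [List.flatMap_cons, pv_insertBy_append _ _ _ _ h1, pv_insertBy_all _ _ _ h2,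
        List.flatMap_cons, if_pos hxk]
      rw [pv_flatMap_congr ks' (fun k => F k ++ if key x = k then [x] else []) F
        (by intro a ha
            show F a ++ (if key x = a then [x] else []) = F a
            rw [if_neg (by intro he; have := hk a ha; omega)]
            simp)]
      simp
    · have hx' : key x ∈ ks' := by rcases List.mem_cons.mp hx with h | h; exact absurd h hxk; exact h
      have hlt : k < key x := hk _ hx'
      have h1 : ∀ y ∈ F k, (fun a b => decide (key a < key b)) x y = false := by
        intro y hy
        have := hF k (by simp) y hy
        simp only [this, decide_eq_false_iff_not]
        omega
      rw [List.flatMap_cons, pv_insertBy_append _ _ _ _ h1,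
        ih F hp' hx' (fun k' hk' y hy => hF k' (by simp [hk']) y hy),
        List.flatMap_cons, if_neg hxk]
      simp

theorem pv_sorted_flat {α : Type} (key : α → Int) (xs : List α) :
    ∀ (ks : List Int), ks.Pairwise (· < ·) → (∀ x ∈ xs, key x ∈ ks) →
      PySem.List.sorted xs key false =
        ks.flatMap (fun k => xs.filter (fun x => decide (key x = k))) := by
  induction xs using List.reverseRecOn with
  | nil => intro ks _ _; simp [PySem.List.sorted]
  | append_singleton xs x ih =>
    intro ks hp hcov
    rw [PySem.List.sorted_eq_foldl_insertBy, List.foldl_append]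
    simp only [List.foldl_cons, List.foldl_nil]
    rw [← PySem.List.sorted_eq_foldl_insertBy,
      ih ks hp (fun y hy => hcov y (by simp [hy]))]
    rw [pv_insertBy_flat key x ks _ hp (hcov x (by simp))
      (fun k _ y hy => by simpa using (List.mem_filter.mp hy).2)]
    apply pv_flatMap_congr
    intro k _
    show xs.filter (fun x => decide (key x = k)) ++ (if key x = k then [x] else []) = _
    rw [List.filter_append]
    congr 1
    by_cases h : key x = k <;> simp [h]

theorem pv_sorted2_eq {α : Type} (k1 k2 : α → Int)
    (h : ∀ c, k2 c = 0 ∨ k2 c = 1 ∨ k2 c = 2) (xs : List α) :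
    PySem.List.sorted2 xs k1 k2 false =
      PySem.List.sorted xs (fun c => 3 * k1 c + k2 c) false := by
  show List.foldl (fun acc x => PySem.List.insertBy _ x acc) [] xs = _
  rw [PySem.List.sorted_eq_foldl_insertBy]
  have hfun : (fun a b => (decide (k1 a < k1 b) || (!decide (k1 b < k1 a) && decide (k2 a < k2 b))))
      = (fun a b => decide (3 * k1 a + k2 a < 3 * k1 b + k2 b)) := by
    funext a b
    have h1 := h a; have h2 := h b
    by_cases h3 : k1 a < k1 b <;> by_cases h4 : k1 b < k1 a <;>
      by_cases h5 : k2 a < k2 b <;>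
      simp [h3, h4, h5] <;> omega
  show List.foldl (fun acc x => PySem.List.insertBy
      (if (false = true) then _ else (fun a b => (decide (k1 a < k1 b) || (!decide (k1 b < k1 a) && decide (k2 a < k2 b))))) x acc) [] xs = _
  rw [if_neg (by simp), hfun]
theorem pv_rank_append (l : List (List (String × Option Int))) (x : List (String × Option Int)) :
    pvRankDict (l ++ [x]) = (pvRankDict l).insert (pvId x) (l.length : Int) := by
  unfold pvRankDict
  rw [PySem.List.enumerate_append, List.foldl_append]
  simp [PySem.List.enumerate]

theorem pv_rank_keys (l : List (List (String × Option Int))) :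
    (pvRankDict l).keys = PySem.Set.ofList (l.map pvId) := by
  unfold pvRankDict
  rw [PySem.Dict.keys_foldl_insert_key (PySem.List.enumerate l) (fun ip => pvId ip.2) (fun _ ip => ip.1)]
  have : List.map (fun ip => pvId ip.2) (PySem.List.enumerate l) = l.map pvId := by
    have := PySem.List.map_snd_enumerate l 0
    calc List.map (fun ip => pvId ip.2) (PySem.List.enumerate l)
        = List.map pvId (List.map (fun p => p.2) (PySem.List.enumerate l)) := by
          rw [List.map_map]; rfl
      _ = l.map pvId := by rw [this]
  rw [this]
  have hk : (PySem.Dict.mk ([] : List ((Option Int) × Int))).keys = [] := rfl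
  rw [hk]
  exact PySem.Set.update_nil_left _

theorem pv_rank_contains (l : List (List (String × Option Int))) (k : Option Int) :
    (pvRankDict l).contains k = true ↔ k ∈ l.map pvId := by
  rw [PySem.Dict.contains_iff_mem_keys, pv_rank_keys, PySem.Set.mem_ofList]

theorem pv_rank_get (l : List (List (String × Option Int))) :
    ((l.map pvId).Nodup) → ∀ (r : Nat) (hr : r < l.length),
      (pvRankDict l).get? (pvId l[r]) = some (r : Int) := by
  induction l using List.reverseRecOn with
  | nil => intro _ r hr; simp at hr
  | append_singleton l x ih =>
    intro hnd r hr
    have hnd' : ((l ++ [x]).map pvId).Nodup := hnd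
    rw [List.map_append, List.nodup_append] at hnd'
    rw [pv_rank_append, PySem.Dict.get?_insert]
    rcases Nat.lt_or_ge r l.length with h | h
    · have hget : (l ++ [x])[r] = l[r] := List.getElem_append_left h
      rw [hget, if_neg, ih hnd'.1 r h]
      intro he
      have hmem : pvId l[r] ∈ l.map pvId := List.mem_map_of_mem (List.getElem_mem h)
      have hxmem : pvId l[r] ∈ [x].map pvId := by simp [he]
      exact hnd'.2.2 _ hmem _ hxmem rfl
    · have hrl : r = l.length := by simp at hr; omega
      subst hrl
      have hget : (l ++ [x])[l.length] = x := by simp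
      rw [hget, if_pos rfl]
theorem pv_children_getD :
    ∀ (l : List (List (String × Option Int))) (d : PySem.Dict (Option Int) (List (List (String × Option Int)))) (k : Option Int),
      (l.foldl (fun m c =>
        let pid := pvPid c
        if pvTruthy pid then PySem.Dict.modify m pid [] (fun cl => cl ++ [c]) else m) d).getD k []
      = d.getD k [] ++ l.filter (fun c => pvTruthy (pvPid c) && (pvPid c == k)) := by
  intro l
  induction l with
  | nil => intro d k; simp
  | cons c t ih =>
    intro d k
    simp only [List.foldl_cons, List.filter_cons]
    by_cases hc : pvTruthy (pvPid c)
    · simp only [hc, if_true, Bool.true_and]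
      rw [ih]
      by_cases hk : pvPid c == k
      · have hk' : k = pvPid c := by have := eq_of_beq hk; exact this.symm
        rw [PySem.Dict.getD_modify, if_pos hk', hk, hk']
        simp [List.append_assoc]
      · rw [PySem.Dict.getD_modify, if_neg (by intro he; rw [he] at hk; simp at hk)]
        simp only [hk]
        rfl
    · simp only [hc, if_false, Bool.false_and]
      exact ih d k

theorem pv_foldl_app {α : Type} : ∀ (l : List α) (acc : List α),
    l.foldl (fun a x => a ++ [x]) acc = acc ++ l := by
  intro l
  induction l with
  | nil => simp
  | cons x t ih => intro acc; simp [ih]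

theorem pv_foldl_filter {α : Type} (p : α → Bool) : ∀ (l : List α) (acc : List α),
    l.foldl (fun a c => if p c then a else a ++ [c]) acc = acc ++ l.filter (fun c => !p c) := by
  intro l
  induction l with
  | nil => simp
  | cons x t ih =>
    intro acc
    simp only [List.foldl_cons, List.filter_cons]
    by_cases hx : p x
    · simp only [hx, if_true, Bool.not_true]
      rw [ih]; rfl
    · simp only [hx, if_false, Bool.not_false]
      rw [ih]; simp

theorem pv_filter_singleton {α : Type} : ∀ (l : List α) (P : α → Bool) (r : Nat) (hr : r < l.length),
    (∀ (i : Nat) (hi : i < l.length), P l[i] = decide (i = r)) → l.filter P = [l[r]] := by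
  intro l
  induction l with
  | nil => intro P r hr; simp at hr
  | cons x t ih =>
    intro P r hr hval
    rcases r with _ | s
    · have hx : P x = true := by simpa using hval 0 (by simp)
      have ht : t.filter P = [] := by
        rw [List.filter_eq_nil_iff]
        intro y hy
        obtain ⟨j, hj, hjy⟩ := List.mem_iff_getElem.mp hy
        have := hval (j+1) (by simp; omega)
        simp only [List.getElem_cons_succ] at this
        rw [hjy] at this
        simp [this]
      simp [List.filter_cons, hx, ht]
    · have hx : P x = false := by simpa using hval 0 (by simp)
      have hs : s < t.length := by simp at hr; omega
      have := ih P s hs (by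
        intro i hi
        have := hval (i+1) (by simp; omega)
        simpa using this)
      simp [List.filter_cons, hx, this]

theorem pv_flatMap_congr' {α β : Type} (l : List α) (f g : α → List β)
    (h : ∀ a ∈ l, f a = g a) : l.flatMap f = l.flatMap g := by
  induction l with
  | nil => rfl
  | cons a t ih =>
    simp only [List.flatMap_cons, h a (by simp)]
    rw [ih (fun b hb => h b (by simp [hb]))]

theorem pv_flatMap_index {β : Type} :
    ∀ (l : List (List (String × Option Int))) (g : List (String × Option Int) → List β),
      l.flatMap g = (List.range l.length).flatMap (fun i => g (l.getD i [])) := by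
  intro l
  induction l using List.reverseRecOn with
  | nil => intro g; simp
  | append_singleton l x ih =>
    intro g
    simp only [List.length_append, List.length_singleton, List.range_succ, List.flatMap_append]
    congr 1
    · rw [ih g]
      apply pv_flatMap_congr'
      intro i hi
      have hi' : i < l.length := List.mem_range.mp hi
      rw [List.getD_append _ _ _ _ hi']
    · have : (l ++ [x]).getD l.length [] = x := by
        simp [List.getD_eq_getElem?_getD]
      simp [this]

theorem pv_ks_core (f : Nat → List Int) (hf : ∀ r, f r = [3*(r:Int), 3*(r:Int)+1]) :
    ∀ (m : Nat), ((List.range m).flatMap f).Pairwise (· < ·) ∧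
      (∀ z ∈ (List.range m).flatMap f, z < 3*(m:Int)) := by
  intro m
  induction m with
  | zero => simp
  | succ m ih =>
    rw [List.range_succ, List.flatMap_append]
    constructor
    · rw [List.pairwise_append]
      refine ⟨ih.1, ?_, ?_⟩
      · simp [hf]
      · intro a ha b hb
        have := ih.2 a ha
        simp [hf] at hb
        rcases hb with h | h <;> omega
    · intro z hz
      rw [List.mem_append] at hz
      rcases hz with h | h
      · have := ih.2 z h; push_cast; omega
      · simp [hf] at h; push_cast; rcases h with h | h <;> omega


theorem pv_fold_main (ps : List (List (String × Option Int)))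
    (chl : List (String × Option Int) → List (List (String × Option Int))) :
    ∀ (acc : List (List (String × Option Int))),
      ps.foldl (fun acc p => (chl p).foldl (fun a c => a ++ [c]) (acc ++ [p])) acc
        = acc ++ ps.flatMap (fun p => p :: chl p) := by
  induction ps with
  | nil => intro acc; simp
  | cons p t ih =>
    intro acc
    simp only [List.foldl_cons, List.flatMap_cons]
    rw [pv_foldl_app, ih]
    simp

theorem pv_U (categories : List (List (String × Option Int)))
    (hP : ((pvParents categories).map pvId).Nodup) (i j : Nat)
    (hi : i < (pvParents categories).length) (hj : j < (pvParents categories).length)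
    (h : pvId (pvParents categories)[i] = pvId (pvParents categories)[j]) : i = j := by
  have h1 := pv_rank_get (pvParents categories) (hP) i hi
  have h2 := pv_rank_get (pvParents categories) (hP) j hj
  rw [h] at h1
  rw [h1] at h2
  have h3 := Option.some.inj h2
  exact_mod_cast h3

theorem pv_R_cases (categories : List (List (String × Option Int)))
    (hP : ((pvParents categories).map pvId).Nodup) (c : List (String × Option Int)) (hc : c ∈ categories) :
    (∃ r, ∃ _ : r < (pvParents categories).length, (pvParents categories)[r] = c ∧
        pvTruthy (pvPid c) = false ∧ pvR categories c = 3*(r:Int)) ∨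
    (∃ r, ∃ _ : r < (pvParents categories).length, pvId (pvParents categories)[r] = pvPid c ∧
        pvTruthy (pvPid c) = true ∧ (pvRankDict (pvParents categories)).contains (pvPid c) = true ∧
        pvR categories c = 3*(r:Int)+1) ∨
    (pvTruthy (pvPid c) = true ∧ (pvRankDict (pvParents categories)).contains (pvPid c) = false ∧
        pvR categories c = 3*((pvParents categories).length : Int)+2) := by
  by_cases ht : pvTruthy (pvPid c)
  · by_cases hco : (pvRankDict (pvParents categories)).contains (pvPid c)
    · right; left
      have hmem : pvPid c ∈ (pvParents categories).map pvId := (pv_rank_contains _ _).mp hco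
      obtain ⟨p, hp, hpe⟩ := List.mem_map.mp hmem
      obtain ⟨r, hr, heq⟩ := List.mem_iff_getElem.mp hp
      refine ⟨r, hr, by rw [heq]; exact hpe, ht, hco, ?_⟩
      unfold pvR pvK1 pvK2
      rw [if_neg (by simp [ht]), if_pos hco, if_neg (by simp [ht]), if_pos hco]
      have hg := pv_rank_get (pvParents categories) (hP) r hr
      rw [heq, hpe] at hg
      rw [PySem.Dict.getD_of_get?_eq_some _ _ hg]
    · right; right
      refine ⟨ht, by simpa using hco, ?_⟩
      unfold pvR pvK1 pvK2
      rw [if_neg (by simp [ht]), if_neg (by simp [hco]), if_neg (by simp [ht]), if_neg (by simp [hco])]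
  · left
    have hcP : c ∈ pvParents categories := by
      unfold pvParents; rw [List.mem_filter]; exact ⟨hc, by simp [ht]⟩
    obtain ⟨r, hr, heq⟩ := List.mem_iff_getElem.mp hcP
    refine ⟨r, hr, heq, by simpa using ht, ?_⟩
    unfold pvR pvK1 pvK2
    rw [if_pos (by simp [ht]), if_pos (by simp [ht])]
    have hg := pv_rank_get (pvParents categories) (hP) r hr
    rw [heq] at hg
    rw [PySem.Dict.getD_of_get?_eq_some _ _ hg]
    ring

theorem pv_F1 (categories : List (List (String × Option Int)))
    (hP : ((pvParents categories).map pvId).Nodup) (r : Nat) (hr : r < (pvParents categories).length)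
    (c : List (String × Option Int)) (hc : c ∈ categories) :
    (decide (pvR categories c = 3*(r:Int)))
      = (!pvTruthy (pvPid c) && (pvId c == pvId (pvParents categories)[r])) := by
  rcases pv_R_cases categories hP c hc with ⟨s, hs, heq, ht, hR⟩ | ⟨s, hs, heq, ht, hco, hR⟩ | ⟨ht, hco, hR⟩
  · rw [hR, ht]
    by_cases hsr : s = r
    · subst hsr
      simp only [decide_eq_true_eq]
      rw [← heq]
      simp
    · have h1 : ¬ (3*(s:Int) = 3*(r:Int)) := by omega
      rw [decide_eq_false h1]
      have h2 : ¬ (pvId c == pvId (pvParents categories)[r]) = true := by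
        rw [beq_iff_eq, ← heq]
        intro he
        exact hsr (pv_U categories hP s r hs hr he)
      simp [Bool.eq_false_iff.mpr h2]
  · rw [hR, ht]
    have h1 : ¬ (3*(s:Int)+1 = 3*(r:Int)) := by omega
    simp [h1]
  · rw [hR, ht]
    have h1 : ¬ (3*((pvParents categories).length:Int)+2 = 3*(r:Int)) := by omega
    simp [h1]

theorem pv_F2 (categories : List (List (String × Option Int)))
    (hP : ((pvParents categories).map pvId).Nodup) (r : Nat) (hr : r < (pvParents categories).length)
    (c : List (String × Option Int)) (hc : c ∈ categories) :
    (decide (pvR categories c = 3*(r:Int)+1))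
      = (pvTruthy (pvPid c) && (pvPid c == pvId (pvParents categories)[r])) := by
  rcases pv_R_cases categories hP c hc with ⟨s, hs, heq, ht, hR⟩ | ⟨s, hs, heq, ht, hco, hR⟩ | ⟨ht, hco, hR⟩
  · rw [hR, ht]
    have h1 : ¬ (3*(s:Int) = 3*(r:Int)+1) := by omega
    simp [h1]
  · rw [hR, ht]
    by_cases hsr : s = r
    · subst hsr
      simp only [decide_eq_true_eq, Bool.true_and]
      rw [← heq]
      simp
    · have h1 : ¬ (3*(s:Int)+1 = 3*(r:Int)+1) := by omega
      rw [decide_eq_false h1]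
      have h2 : ¬ (pvPid c == pvId (pvParents categories)[r]) = true := by
        rw [beq_iff_eq, ← heq]
        intro he
        exact hsr (pv_U categories hP s r hs hr he)
      simp [Bool.eq_false_iff.mpr h2]
  · rw [hR, ht]
    have h1 : ¬ (3*((pvParents categories).length:Int)+2 = 3*(r:Int)+1) := by omega
    rw [decide_eq_false h1]
    have h2 : ¬ (pvPid c == pvId (pvParents categories)[r]) = true := by
      rw [beq_iff_eq]
      intro he
      have hmem : pvPid c ∈ (pvParents categories).map pvId := by
        rw [he]; exact List.mem_map_of_mem (List.getElem_mem hr)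
      rw [(pv_rank_contains _ _).mpr hmem] at hco
      simp at hco
    simp [Bool.eq_false_iff.mpr h2]

theorem pv_F3 (categories : List (List (String × Option Int)))
    (hP : ((pvParents categories).map pvId).Nodup)
    (c : List (String × Option Int)) (hc : c ∈ categories) :
    (decide (pvR categories c = 3*((pvParents categories).length:Int)+2))
      = (pvTruthy (pvPid c) && !(pvRankDict (pvParents categories)).contains (pvPid c)) := by
  rcases pv_R_cases categories hP c hc with ⟨s, hs, heq, ht, hR⟩ | ⟨s, hs, heq, ht, hco, hR⟩ | ⟨ht, hco, hR⟩
  · rw [hR, ht]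
    have h1 : ¬ (3*(s:Int) = 3*((pvParents categories).length:Int)+2) := by omega
    simp [h1]
  · rw [hR, ht, hco]
    have h1 : ¬ (3*(s:Int)+1 = 3*((pvParents categories).length:Int)+2) := by omega
    simp [h1]
  · rw [hR, ht, hco]
    simp

theorem pv_F4 (categories : List (List (String × Option Int)))
    (hP : ((pvParents categories).map pvId).Nodup)
    (c : List (String × Option Int)) (hc : c ∈ categories) :
    pvR categories c ∈ pvKs (pvParents categories).length := by
  unfold pvKs
  rcases pv_R_cases categories hP c hc with ⟨s, hs, _, _, hR⟩ | ⟨s, hs, _, _, _, hR⟩ | ⟨_, _, hR⟩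
  · rw [hR, List.mem_append]
    left
    rw [List.mem_flatMap]
    refine ⟨s, ?_, ?_⟩ <;> simp [hs]
  · rw [hR, List.mem_append]
    left
    rw [List.mem_flatMap]
    refine ⟨s, ?_, ?_⟩ <;> simp [hs]
  · rw [hR, List.mem_append]
    right
    simp

theorem pv_main_sub (categories : List (List (String × Option Int))) :
    ∀ d ∈ pvMain categories, d ∈ categories := by
  intro d hd
  unfold pvMain at hd
  obtain ⟨p, hp, hd'⟩ := List.mem_flatMap.mp hd
  rcases List.mem_cons.mp hd' with h | h
  · subst h
    exact (List.mem_filter.mp hp).1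
  · exact (List.mem_filter.mp h).1

theorem pv_F5 (categories : List (List (String × Option Int)))
    (hP : ((pvParents categories).map pvId).Nodup)
    (h3 : ∀ c ∈ categories, pvTruthy (pvPid c) = true → pvPid c ∉ (pvParents categories).map pvId →
      ∀ d ∈ categories, (pvTruthy (pvPid d) = false ∨ pvPid d ∈ (pvParents categories).map pvId) →
        pvId c ≠ pvId d)
    (c : List (String × Option Int)) (hc : c ∈ categories) :
    PySem.Set.contains (PySem.Set.ofList ((pvMain categories).map pvId)) (pvId c)
      = (!pvTruthy (pvPid c) || (pvRankDict (pvParents categories)).contains (pvPid c)) := by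
  rw [Bool.eq_iff_iff, PySem.Set.contains_iff, PySem.Set.mem_ofList]
  rcases pv_R_cases categories hP c hc with ⟨s, hs, heq, ht, _⟩ | ⟨s, hs, heq, ht, hco, _⟩ | ⟨ht, hco, _⟩
  · rw [ht]
    simp only [Bool.not_false, Bool.true_or, iff_true]
    apply List.mem_map_of_mem
    unfold pvMain
    rw [List.mem_flatMap]
    exact ⟨c, heq ▸ List.getElem_mem hs, by simp⟩
  · rw [ht, hco]
    simp only [Bool.not_true, Bool.false_or, iff_true]
    apply List.mem_map_of_mem
    unfold pvMain
    rw [List.mem_flatMap]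
    refine ⟨(pvParents categories)[s], List.getElem_mem hs, ?_⟩
    apply List.mem_cons.mpr
    right
    unfold pvChl
    rw [List.mem_filter]
    exact ⟨hc, by rw [Bool.and_eq_true, beq_iff_eq]; exact ⟨ht, heq.symm⟩⟩
  · rw [ht, hco]
    refine iff_of_false ?_ (by simp)
    intro hmem
    obtain ⟨d, hd, hde⟩ := List.mem_map.mp hmem
    have hnp : pvPid c ∉ (pvParents categories).map pvId := by
      intro hm
      rw [(pv_rank_contains _ _).mpr hm] at hco
      cases hco
    have hdc : d ∈ categories := pv_main_sub categories d hd
    have hclass : pvTruthy (pvPid d) = false ∨ pvPid d ∈ (pvParents categories).map pvId := by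
      unfold pvMain at hd
      obtain ⟨p, hp, hd'⟩ := List.mem_flatMap.mp hd
      rcases List.mem_cons.mp hd' with h' | h'
      · subst h'
        left
        have := (List.mem_filter.mp hp).2
        simpa using this
      · right
        have h2 := (List.mem_filter.mp h').2
        rw [Bool.and_eq_true, beq_iff_eq] at h2
        rw [h2.2]
        exact List.mem_map_of_mem hp
    exact h3 c hc ht hnp d hdc hclass hde.symm

theorem pv_ks_pairwise (m : Nat) : (pvKs m).Pairwise (· < ·) := by
  obtain ⟨h1, h2⟩ := pv_ks_core (fun r => [3*(r:Int), 3*(r:Int)+1]) (fun _ => rfl) m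
  unfold pvKs
  rw [List.pairwise_append]
  refine ⟨h1, by simp, ?_⟩
  intro a ha b hb
  simp only [List.mem_singleton] at hb
  subst hb
  have := h2 a ha
  omega

theorem pv_fold_main' (categories : List (List (String × Option Int)))
    (ps : List (List (String × Option Int))) (acc : List (List (String × Option Int))) :
    ps.foldl (fun acc p => (pvChl categories (pvId p)).foldl (fun a c => a ++ [c]) (acc ++ [p])) acc
      = acc ++ ps.flatMap (fun p => p :: pvChl categories (pvId p)) :=
  pv_fold_main ps _ acc

theorem pv_A_shape (categories : List (List (String × Option Int))) :
    order_categories_hierarchically_py categories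
      = pvMain categories ++ categories.filter
          (fun c => !(PySem.Set.contains (PySem.Set.ofList ((pvMain categories).map pvId)) (pvId c))) := by
  simp only [order_categories_hierarchically_py]
  have hch : ∀ k, (categories.foldl (fun m c =>
      let pid := pvPid c
      if pvTruthy pid then PySem.Dict.modify m pid [] (fun l => l ++ [c]) else m)
      (PySem.Dict.mk [])).getD k [] = pvChl categories k := by
    intro k
    rw [pv_children_getD]
    have h0 : (PySem.Dict.mk ([] : List ((Option Int) × List (List (String × Option Int))))).getD k [] = [] := rfl
    rw [h0]
    rfl
  simp only [hch]
  rw [pv_fold_main']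
  simp only [List.nil_append]
  rw [show (List.flatMap (fun p => p :: pvChl categories (pvId p))
        (List.filter (fun c => !pvTruthy (pvPid c)) categories)) = pvMain categories from rfl]
  exact pv_foldl_filter _ categories (pvMain categories)

theorem pv_B_shape (categories : List (List (String × Option Int))) :
    order_categories_hierarchically_py_alt categories
      = PySem.List.sorted categories (pvR categories) false := by
  have h0 : order_categories_hierarchically_py_alt categories
      = PySem.List.sorted2 categories (pvK1 categories) (pvK2 categories) false := rfl
  rw [h0, pv_sorted2_eq _ _ (fun c => by unfold pvK2; split_ifs <;> simp)]
  rfl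

theorem pv_G_par (categories : List (List (String × Option Int)))
    (hP : ((pvParents categories).map pvId).Nodup) (r : Nat) (hr : r < (pvParents categories).length) :
    categories.filter (fun c => decide (pvR categories c = 3*(r:Int)))
      = [(pvParents categories)[r]] := by
  rw [List.filter_congr (fun c hc => pv_F1 categories hP r hr c hc)]
  rw [List.filter_congr (fun c (_ : c ∈ categories) => Bool.and_comm (!pvTruthy (pvPid c)) (pvId c == pvId (pvParents categories)[r]))]
  rw [← List.filter_filter]
  have hPfold : categories.filter (fun c => !pvTruthy (pvPid c)) = pvParents categories := rfl
  rw [hPfold]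
  apply pv_filter_singleton _ _ r hr
  intro i hi
  rw [Bool.eq_iff_iff]
  simp only [beq_iff_eq, decide_eq_true_eq]
  constructor
  · intro h
    exact pv_U categories hP i r hi hr h
  · intro h
    subst h
    rfl

theorem pv_G_chd (categories : List (List (String × Option Int)))
    (hP : ((pvParents categories).map pvId).Nodup) (r : Nat) (hr : r < (pvParents categories).length) :
    categories.filter (fun c => decide (pvR categories c = 3*(r:Int)+1))
      = pvChl categories (pvId (pvParents categories)[r]) := by
  rw [List.filter_congr (fun c hc => pv_F2 categories hP r hr c hc)]
  rfl


theorem pv_main : ∀ (categories : List (List (String × Option Int))),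
    Pre_order_categories_hierarchically_py categories →
    order_categories_hierarchically_py categories = order_categories_hierarchically_py_alt categories := by
  intro categories hpre
  obtain ⟨-, hP, h3⟩ := hpre
  rw [pv_A_shape, pv_B_shape,
    pv_sorted_flat (pvR categories) categories (pvKs (pvParents categories).length)
      (pv_ks_pairwise _) (fun c hc => pv_F4 categories hP c hc)]
  unfold pvKs
  rw [List.flatMap_append]
  congr 1
  · have hM : pvMain categories = (List.range (pvParents categories).length).flatMap
        (fun i => (pvParents categories).getD i [] :: pvChl categories (pvId ((pvParents categories).getD i []))) :=
      pv_flatMap_index _ _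
    rw [hM, pv_flatMap_flatMap]
    apply pv_flatMap_congr'
    intro r hrm
    have hr : r < (pvParents categories).length := List.mem_range.mp hrm
    rw [List.getD_eq_getElem _ _ hr]
    simp only [List.flatMap_cons, List.flatMap_nil, List.append_nil]
    rw [pv_G_par categories hP r hr, pv_G_chd categories hP r hr]
    simp
  · simp only [List.flatMap_cons, List.flatMap_nil, List.append_nil]
    apply List.filter_congr
    intro c hc
    rw [pv_F5 categories hP h3 c hc, pv_F3 categories hP c hc]
    cases pvTruthy (pvPid c) <;> cases (pvRankDict (pvParents categories)).contains (pvPid c) <;> rfl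

-- ===== VERDICT (by name: the statement is the Claim_ definition above) =====
theorem order_categories_hierarchically_py_spec : Claim_equal_order_categories_hierarchically_py := by
  intro categories _ hpre
  exact pv_main categories hpre
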